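-- pv_equiv track=rewrite | github.com/pinti-zh/depot-charging-optimization | src/depot_charging_optimization/utils.py | find_continuos_blocks
-- ===== SOURCE A (Python) =====
-- from typing import Iterable, Sequence, TypeVar
--
-- T = TypeVar("T")
--
-- def find_continuos_blocks(values: Sequence[T]) -> list[tuple[int, int, T]]:
--     continuous_blocks = []
--     last_change = 0
--     for v1, (i, v2) in zip(values, enumerate(values[1:])):
--         if v1 != v2:
--             continuous_blocks.append((last_change, i + 1, v1))
--             last_change = i + 1
--     continuous_blocks.append((last_change, len(values), values[-1]))
--     if continuous_blocks[0][2] == continuous_blocks[-1][2]: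
--         continuous_blocks = continuous_blocks[1:-1] + [
--             (continuous_blocks[-1][0], continuous_blocks[0][1], continuous_blocks[-1][2])
--         ]
--     return continuous_blocks
-- ===== SOURCE B (Python) =====
-- def find_continuos_blocks(values):
--     blocks = []
--     start = 0
--     while start < len(values):
--         end = start + 1
--         while end < len(values) and values[end] == values[start]:
--             end += 1
--         blocks.append((start, end, values[start]))
--         start = end
--     if blocks[0][2] == blocks[-1][2]:
--         blocks = blocks[1:-1] + [
--             (blocks[-1][0], blocks[0][1], blocks[-1][2])
--         ]
--     return blocks
-- ===== Notes on version B (the rewrite author's own statement) =====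
-- stated objective: alternative
-- what changed: B replaces A's single pairwise scan (zip of values with enumerate(values[1:]) carrying a last_change accumulator plus a separate final append of values[-1]) by run-peeling: an outer loop that, for each run, advances an inner while comparing against the run's head element to find the run's end, emitting each block directly; the same wraparound merge follows.
import Mathlib
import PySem

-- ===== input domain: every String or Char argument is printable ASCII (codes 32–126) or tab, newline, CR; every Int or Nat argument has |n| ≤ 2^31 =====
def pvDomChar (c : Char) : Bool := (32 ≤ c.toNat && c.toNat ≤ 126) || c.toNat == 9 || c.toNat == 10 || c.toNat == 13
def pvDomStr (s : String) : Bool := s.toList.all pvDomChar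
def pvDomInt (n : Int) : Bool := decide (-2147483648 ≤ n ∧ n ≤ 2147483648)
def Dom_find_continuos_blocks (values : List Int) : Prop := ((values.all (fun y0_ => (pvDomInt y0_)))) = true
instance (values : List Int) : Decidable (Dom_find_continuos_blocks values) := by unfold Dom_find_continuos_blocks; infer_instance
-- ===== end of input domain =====

-- B replaces A's pairwise scan with last_change accumulator by run-peeling (inner while finds each
-- run's end, outer loop emits the block and jumps there); same cost, different decomposition.
-- Both Pythons raise IndexError on the empty list, which Pre_ excludes.

-- ===== PORT A =====
def find_continuos_blocks (values : List Int) : List (Int × Int × Int) :=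
  match PySem.List.pyGet? values (-1) with
  | none => []  -- Python raises IndexError here (empty list); excluded by Pre_
  | some lastv =>
    let st := (values.zip (PySem.List.enumerate (PySem.List.slice values (some 1) none) 0)).foldl
      (fun (st : List (Int × Int × Int) × Int) (p : Int × (Int × Int)) =>
        if p.1 ≠ p.2.2 then (st.1 ++ [(st.2, p.2.1 + 1, p.1)], p.2.1 + 1) else st)
      ([], 0)
    let blocks := st.1 ++ [(st.2, (values.length : Int), lastv)]
    let first := PySem.List.pyGetD blocks 0 (0, 0, 0)
    let last := PySem.List.pyGetD blocks (-1) (0, 0, 0)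
    if first.2.2 = last.2.2 then
      PySem.List.slice blocks (some 1) (some (-1)) ++ [(last.1, first.2.1, last.2.2)]
    else blocks

-- ===== PORT B =====
-- inner while loop of B: how many further elements equal the run's head
def pvCountRun (v : Int) : List Int → Nat
  | [] => 0
  | x :: r => if x = v then pvCountRun v r + 1 else 0

-- outer loop of B: peel off one run at a time, starting at absolute index s
def pvRunsB (s : Nat) : List Int → List (Int × Int × Int)
  | [] => []
  | v :: rest =>
    ((s : Int), ((s + (pvCountRun v rest + 1) : Nat) : Int), v)
      :: pvRunsB (s + (pvCountRun v rest + 1)) (rest.drop (pvCountRun v rest))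
termination_by l => l.length
decreasing_by
  simp only [List.length_drop, List.length_cons]
  omega

def find_continuos_blocks_alt (values : List Int) : List (Int × Int × Int) :=
  let blocks := pvRunsB 0 values
  let first := PySem.List.pyGetD blocks 0 (0, 0, 0)
  let last := PySem.List.pyGetD blocks (-1) (0, 0, 0)
  if first.2.2 = last.2.2 then
    PySem.List.slice blocks (some 1) (some (-1)) ++ [(last.1, first.2.1, last.2.2)]
  else blocks

-- ===== PRECONDITION & SPEC =====
-- Pre_ excludes exactly the empty list, on which both Pythons raise IndexError.
def Pre_find_continuos_blocks (values : List Int) : Prop := values ≠ []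
instance (values : List Int) : Decidable (Pre_find_continuos_blocks values) := by unfold Pre_find_continuos_blocks; infer_instance
def pvWitness_find_continuos_blocks : List Int := [1, 1, 2, 3, 1]
def Spec_find_continuos_blocks (values : List Int) (out : List (Int × Int × Int)) : Prop := out = find_continuos_blocks_alt values
instance (values : List Int) (out : List (Int × Int × Int)) : Decidable (Spec_find_continuos_blocks values out) := by unfold Spec_find_continuos_blocks; infer_instance

-- ===== CLAIM (what is proved, stated in full; the proofs are below) =====
def Claim_equal_find_continuos_blocks : Prop := ∀ (values : List Int), Dom_find_continuos_blocks values → Pre_find_continuos_blocks values → Spec_find_continuos_blocks values (find_continuos_blocks values)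

-- ===== LEMMAS AND PROOFS =====

-- canonical run decomposition: runs lc pos l, lc = start of current run, pos = index of l.head
def pvRuns (lc pos : Int) : List Int → List (Int × Int × Int)
  | [] => []
  | [v] => [(lc, pos + 1, v)]
  | v1 :: v2 :: rest =>
    if v1 ≠ v2 then (lc, pos + 1, v1) :: pvRuns (pos + 1) (pos + 1) (v2 :: rest)
    else pvRuns lc (pos + 1) (v2 :: rest)

lemma pvFoldA (rest : List Int) : ∀ (v : Int) (s : Int) (acc : List (Int × Int × Int)) (lc w : Int),
    (v :: rest).getLast? = some w →
    (let st := ((v :: rest).zip (PySem.List.enumerate rest s)).foldl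
      (fun (st : List (Int × Int × Int) × Int) (p : Int × (Int × Int)) =>
        if p.1 ≠ p.2.2 then (st.1 ++ [(st.2, p.2.1 + 1, p.1)], p.2.1 + 1) else st)
      (acc, lc)
     st.1 ++ [(st.2, s + 1 + rest.length, w)]) = acc ++ pvRuns lc s (v :: rest) := by
  induction rest with
  | nil =>
    intro v s acc lc w hw
    simp [PySem.List.enumerate, pvRuns] at hw ⊢
    omega
  | cons v2 r ih =>
    intro v s acc lc w hw
    rw [List.getLast?_cons_cons] at hw
    simp only [PySem.List.enumerate_cons, List.zip_cons_cons, List.foldl_cons, pvRuns]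
    by_cases h : v = v2
    · simp only [h, ne_eq, not_true_eq_false, if_false]
      have := ih v2 (s + 1) acc lc w hw
      simp only at this
      rw [show s + 1 + ((v2 :: r).length : Int) = (s + 1) + 1 + (r.length : Int) by simp; omega] at *
      exact this
    · simp only [ne_eq, h, not_false_eq_true, if_true]
      have := ih v2 (s + 1) (acc ++ [(lc, s + 1, v)]) (s + 1) w hw
      simp only at this
      rw [show s + 1 + ((v2 :: r).length : Int) = (s + 1) + 1 + (r.length : Int) by simp; omega]
      rw [this, List.append_assoc]
      simp

-- peeling one whole run off the canonical decomposition
lemma pvRuns_peel (rest : List Int) : ∀ (v : Int) (lc pos : Int),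
    pvRuns lc pos (v :: rest)
      = (lc, pos + (pvCountRun v rest : Int) + 1, v)
        :: pvRuns (pos + (pvCountRun v rest : Int) + 1) (pos + (pvCountRun v rest : Int) + 1)
            (rest.drop (pvCountRun v rest)) := by
  induction rest with
  | nil =>
    intro v lc pos
    simp [pvRuns, pvCountRun]
  | cons v2 r ih =>
    intro v lc pos
    by_cases h : v = v2
    · subst h
      rw [show pvRuns lc pos (v :: v :: r) = pvRuns lc (pos + 1) (v :: r) by simp [pvRuns]]
      rw [ih v lc (pos + 1)]
      have hc : pvCountRun v (v :: r) = pvCountRun v r + 1 := by simp [pvCountRun]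
      rw [hc]
      have he : pos + 1 + (pvCountRun v r : Int) + 1
          = pos + ((pvCountRun v r + 1 : Nat) : Int) + 1 := by push_cast; ring
      rw [he, List.drop_succ_cons]
    · have h' : ¬ v2 = v := fun e => h e.symm
      have hc : pvCountRun v (v2 :: r) = 0 := by simp [pvCountRun, h']
      rw [hc]
      simp [pvRuns, h]

lemma pvRunsB_nil (s : Nat) : pvRunsB s [] = [] := by
  rw [pvRunsB]

lemma pvRunsB_cons (s : Nat) (v : Int) (rest : List Int) :
    pvRunsB s (v :: rest)
      = ((s : Int), ((s + (pvCountRun v rest + 1) : Nat) : Int), v)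
          :: pvRunsB (s + (pvCountRun v rest + 1)) (rest.drop (pvCountRun v rest)) := by
  rw [pvRunsB]

lemma pvRunsB_eq (n : Nat) : ∀ (l : List Int), l.length ≤ n → ∀ (s : Nat),
    pvRunsB s l = pvRuns (s : Int) (s : Int) l := by
  induction n with
  | zero =>
    intro l hl s
    have : l = [] := List.eq_nil_of_length_eq_zero (by omega)
    subst this
    simp [pvRunsB_nil, pvRuns]
  | succ n ih =>
    intro l hl s
    match l with
    | [] => simp [pvRunsB_nil, pvRuns]
    | v :: rest =>
      rw [pvRunsB_cons, pvRuns_peel]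
      have hlen : (rest.drop (pvCountRun v rest)).length ≤ n := by
        simp only [List.length_cons] at hl
        have := List.length_drop (i := pvCountRun v rest) (l := rest)
        omega
      rw [ih _ hlen]
      have he : ((s + (pvCountRun v rest + 1) : Nat) : Int)
          = (s : Int) + (pvCountRun v rest : Int) + 1 := by push_cast; ring
      rw [he]

-- ===== VERDICT (by name: the statement is the Claim_ definition above) =====
theorem find_continuos_blocks_spec : Claim_equal_find_continuos_blocks := by
  intro values _ hpre
  unfold Spec_find_continuos_blocks
  obtain ⟨v, rest, rfl⟩ : ∃ v rest, values = v :: rest := by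
    cases values with
    | nil => exact absurd rfl hpre
    | cons a l => exact ⟨a, l, rfl⟩
  have hw : PySem.List.pyGet? (v :: rest) (-1)
      = some ((v :: rest).getLast (List.cons_ne_nil _ _)) := by
    rw [PySem.List.pyGet?_neg_one, List.getLast?_eq_some_getLast]
  have hA := pvFoldA rest v 0 [] 0 ((v :: rest).getLast (List.cons_ne_nil _ _))
      (List.getLast?_eq_some_getLast _)
  simp only [] at hA
  have hlen : (((v :: rest).length : Nat) : Int) = 0 + 1 + (rest.length : Int) := by
    push_cast; simp; ring
  rw [← hlen] at hA
  have hB := pvRunsB_eq (v :: rest).length (v :: rest) le_rfl 0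
  simp only [Nat.cast_zero] at hB
  simp only [find_continuos_blocks, find_continuos_blocks_alt, hw,
    PySem.List.slice_from_one, List.tail_cons]
  rw [hA, hB]
  simp
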